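-- pv_equiv track=rewrite | github.com/manas-17045/LeetcodeSolutions | Leetcode 2501-2600/2507/2507.py | smallestValue
-- ===== SOURCE A (Python) =====
-- def smallestValue(n: int) -> int:
--     """
--     Calculates the smallest value obtained by repeatedly replacing a number with the sum of its prime factors.
--
--     Args:
--         n: The initial integer.
--     Returns:
--         The smallest value reached after the replacement process stabilizes.
--     """
--     while True:
--         currentSum = 0
--         temp = n
--         divisor = 2
--         while divisor * divisor <= temp:
--             while temp % divisor == 0:
--                 currentSum += divisor
--                 temp //= divisor
--             divisor += 1
--         if temp > 1:
--             currentSum += temp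
--         if currentSum == n:
--             return n
--         n = currentSum
-- ===== SOURCE B (Python) =====
-- def smallestFactor(n: int) -> int:
--     """Smallest divisor >= 2 of n (n itself if n has no divisor d with d*d <= n)."""
--     d = 2
--     while d * d <= n:
--         if n % d == 0:
--             return d
--         d += 1
--     return n
--
--
-- def sumPrimeFactors(n: int) -> int:
--     """Sum of prime factors of n with multiplicity, by peeling one smallest factor per step."""
--     if n < 2:
--         return 0
--     d = smallestFactor(n)
--     return d if d == n else d + sumPrimeFactors(n // d)
--
--
-- def smallestValue(n: int) -> int:
--     s = sumPrimeFactors(n)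
--     return n if s == n else smallestValue(s)
-- ===== Notes on version B (the rewrite author's own statement) =====
-- stated objective: alternative
-- what changed: B replaces A's divisor-scan with nested stripping loops by a smallest-factor helper that peels exactly one prime factor per recursive step (restarting the scan each time), and replaces A's while-True outer fixpoint loop by recursion on the sum-of-prime-factors map.
import Mathlib
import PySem

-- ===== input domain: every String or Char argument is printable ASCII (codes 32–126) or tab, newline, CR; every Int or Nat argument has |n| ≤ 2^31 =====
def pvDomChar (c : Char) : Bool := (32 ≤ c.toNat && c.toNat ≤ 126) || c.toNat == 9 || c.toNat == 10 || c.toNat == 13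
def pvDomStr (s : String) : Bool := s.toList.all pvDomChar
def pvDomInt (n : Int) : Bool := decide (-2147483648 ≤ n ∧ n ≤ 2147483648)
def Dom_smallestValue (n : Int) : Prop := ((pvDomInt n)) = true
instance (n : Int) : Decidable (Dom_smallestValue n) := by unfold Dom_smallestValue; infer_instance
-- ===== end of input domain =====

-- B computes the same sum of prime factors by peeling one smallest factor per recursive step
-- (instead of A's divisor scan with nested stripping loops) and replaces A's while-True outer
-- fixpoint loop by recursion (objective: alternative decomposition, same cost).

-- ===== PORT A =====
-- cited by the termination proofs of pvStrip and sumPF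
theorem pv_div_lt (t d : Int) (ht : 0 < t) (hd : 2 ≤ d) (hdvd : d ∣ t) :
    0 < t / d ∧ t / d < t := by
  obtain ⟨q, rfl⟩ := hdvd
  rw [Int.mul_ediv_cancel_left _ (by omega : d ≠ 0)]
  rcases mul_pos_iff.mp ht with ⟨hd0, hq⟩ | ⟨hd0, hq0⟩
  · exact ⟨hq, (lt_mul_iff_one_lt_left hq).mpr (by omega : (1:Int) < d)⟩
  · omega

-- cited by pvStrip's termination proof
theorem pvStrip_dec (d t : Int) (h : PySem.Int.mod t d = 0 ∧ 0 < t ∧ 2 ≤ d) :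
    (PySem.Int.floordiv t d).toNat < t.toNat := by
  obtain ⟨hm, ht, hd⟩ := h
  have hdvd : d ∣ t := (PySem.Int.mod_eq_zero_iff_dvd t d).mp hm
  rw [PySem.Int.floordiv_eq_ediv_of_pos (by omega : (0:Int) < d)]
  have h1 := pv_div_lt t d ht hd hdvd
  omega

-- A's inner `while temp % divisor == 0: currentSum += divisor; temp //= divisor`.
-- The extra `0 < t ∧ 2 ≤ d` conjuncts are totality guards only: they hold whenever
-- A reaches this loop (temp ≥ divisor*divisor ≥ 4).
def pvStrip (d t s : Int) : Int × Int :=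
  if h : PySem.Int.mod t d = 0 ∧ 0 < t ∧ 2 ≤ d then
    pvStrip d (PySem.Int.floordiv t d) (s + d)
  else (t, s)
termination_by t.toNat
decreasing_by exact pvStrip_dec d t h

-- cited by loopA's termination proof
theorem pvStrip_fst_le (d t s : Int) : (pvStrip d t s).1 ≤ t := by
  induction t, s using pvStrip.induct d with
  | case1 t s h ih =>
    obtain ⟨hm, ht, hd⟩ := h
    have hdvd : d ∣ t := (PySem.Int.mod_eq_zero_iff_dvd t d).mp hm
    rw [pvStrip, dif_pos ⟨hm, ht, hd⟩]
    have h1 := pv_div_lt t d ht hd hdvd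
    rw [PySem.Int.floordiv_eq_ediv_of_pos (by omega : (0:Int) < d)] at ih ⊢
    omega
  | case2 t s h => rw [pvStrip, dif_neg h]

-- cited by loopA's termination proof
theorem loopA_dec (d t s : Int) (h : d * d ≤ t ∧ 2 ≤ d) :
    ((pvStrip d t s).1 + 1 - (d + 1)).toNat < (t + 1 - d).toNat := by
  obtain ⟨hdt, hd⟩ := h
  have h1 : (pvStrip d t s).1 ≤ t := pvStrip_fst_le d t s
  have h2 : 2 * d ≤ d * d := mul_le_mul_of_nonneg_right (by omega) (by omega)
  omega

-- A's `while divisor * divisor <= temp: <strip>; divisor += 1`.  `2 ≤ d` is a totality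
-- guard only (A always calls this with divisor = 2).
def loopA (d t s : Int) : Int × Int :=
  if h : d * d ≤ t ∧ 2 ≤ d then
    loopA (d + 1) (pvStrip d t s).1 (pvStrip d t s).2
  else (t, s)
termination_by (t + 1 - d).toNat
decreasing_by exact loopA_dec d t s h

-- `if temp > 1: currentSum += temp` and picking the result
def pvFinish (p : Int × Int) : Int := if 1 < p.1 then p.2 + p.1 else p.2

-- one pass of A's outer loop body
def sumA (n : Int) : Int := pvFinish (loopA 2 n 0)

-- A's outer `while True` fixpoint loop.  The fuel argument is a totality guard only: each
-- non-final iteration strictly shrinks n (for n ≤ 1 the loop ends within two iterations),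
-- so `n.toNat + 2` units are never exhausted on any run the Python performs.
def runA : Nat → Int → Int
  | 0, n => n
  | fuel + 1, n =>
    let s := sumA n
    if s = n then n else runA fuel s

def smallestValue (n : Int) : Int := runA (n.toNat + 2) n

-- ===== PORT B =====
-- Source B's smallestFactor: `d = 2; while d * d <= n: if n % d == 0: return d; d += 1; return n`.
-- `2 ≤ d` is a totality guard only (B always calls this with d = 2).
-- cited by smallestFac's termination proof
theorem smallestFac_dec (d n : Int) (h : d * d ≤ n ∧ 2 ≤ d) :
    (n + 1 - (d + 1)).toNat < (n + 1 - d).toNat := by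
  obtain ⟨hdn, hd⟩ := h
  have h2 : 2 * d ≤ d * d := mul_le_mul_of_nonneg_right (by omega) (by omega)
  omega

def smallestFac (d n : Int) : Int :=
  if h : d * d ≤ n ∧ 2 ≤ d then
    if PySem.Int.mod n d = 0 then d else smallestFac (d + 1) n
  else n
termination_by (n + 1 - d).toNat
decreasing_by exact smallestFac_dec d n h

-- cited by sumPF's termination proof: smallestFac either returns n or a genuine divisor ≥ 2
theorem smallestFac_cases (d n : Int) :
    smallestFac d n = n ∨ (smallestFac d n ∣ n ∧ 2 ≤ smallestFac d n) := by
  induction d using smallestFac.induct n with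
  | case1 d h hm =>
    right
    rw [smallestFac, dif_pos h, if_pos hm]
    exact ⟨(PySem.Int.mod_eq_zero_iff_dvd n d).mp hm, h.2⟩
  | case2 d h hm ih =>
    rw [smallestFac, dif_pos h, if_neg hm]; exact ih
  | case3 d h => left; rw [smallestFac, dif_neg h]

-- Source B's sumPrimeFactors: peel one smallest factor and recurse
-- cited by sumPF's termination proof
theorem sumPF_dec (n : Int) (h2 : 2 ≤ n) (hd : ¬ smallestFac 2 n = n) :
    (PySem.Int.floordiv n (smallestFac 2 n)).toNat < n.toNat := by
  rcases smallestFac_cases 2 n with h | ⟨hdvd, hge⟩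
  · exact absurd h hd
  · rw [PySem.Int.floordiv_eq_ediv_of_pos (by omega)]
    have h1 := pv_div_lt n (smallestFac 2 n) (by omega) hge hdvd
    omega

def sumPF (n : Int) : Int :=
  if h2 : 2 ≤ n then
    if hd : smallestFac 2 n = n then n
    else smallestFac 2 n + sumPF (PySem.Int.floordiv n (smallestFac 2 n))
  else 0
termination_by n.toNat
decreasing_by exact sumPF_dec n h2 hd

-- Source B's recursive fixpoint; fuel is the same totality guard as in runA
def runB : Nat → Int → Int
  | 0, n => n
  | fuel + 1, n =>
    let s := sumPF n
    if s = n then n else runB fuel s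

def smallestValue_alt (n : Int) : Int := runB (n.toNat + 2) n

-- ===== PRECONDITION & SPEC =====
def Spec_smallestValue (n : Int) (out : Int) : Prop := out = smallestValue_alt n
instance (n : Int) (out : Int) : Decidable (Spec_smallestValue n out) := by unfold Spec_smallestValue; infer_instance

-- ===== CLAIM (what is proved, stated in full; the proofs are below) =====
def Claim_equal_smallestValue : Prop := ∀ (n : Int), Dom_smallestValue n → Spec_smallestValue n (smallestValue n)

-- ===== LEMMAS AND PROOFS =====

theorem pvStrip_fst_pos (d t s : Int) (ht : 0 < t) : 0 < (pvStrip d t s).1 := by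
  induction t, s using pvStrip.induct d with
  | case1 t s h ih =>
    obtain ⟨hm, ht', hd⟩ := h
    have hdvd : d ∣ t := (PySem.Int.mod_eq_zero_iff_dvd t d).mp hm
    rw [pvStrip, dif_pos ⟨hm, ht', hd⟩]
    exact ih (by
      rw [PySem.Int.floordiv_eq_ediv_of_pos (by omega : (0:Int) < d)]
      exact (pv_div_lt t d ht' hd hdvd).1)
  | case2 t s h => rw [pvStrip, dif_neg h]; exact ht

theorem pvStrip_fst_dvd (d t s : Int) : (pvStrip d t s).1 ∣ t := by
  induction t, s using pvStrip.induct d with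
  | case1 t s h ih =>
    obtain ⟨hm, ht', hd⟩ := h
    have hdvd : d ∣ t := (PySem.Int.mod_eq_zero_iff_dvd t d).mp hm
    rw [pvStrip, dif_pos ⟨hm, ht', hd⟩]
    refine ih.trans ?_
    rw [PySem.Int.floordiv_eq_ediv_of_pos (by omega : (0:Int) < d)]
    obtain ⟨q, rfl⟩ := hdvd
    rw [Int.mul_ediv_cancel_left _ (by omega : d ≠ 0)]
    exact ⟨d, by ring⟩
  | case2 t s h => rw [pvStrip, dif_neg h]

theorem pvStrip_not_dvd (d t s : Int) (ht : 0 < t) (hd : 2 ≤ d) :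
    ¬ d ∣ (pvStrip d t s).1 := by
  induction t, s using pvStrip.induct d with
  | case1 t s h ih =>
    obtain ⟨hm, ht', hd'⟩ := h
    have hdvd : d ∣ t := (PySem.Int.mod_eq_zero_iff_dvd t d).mp hm
    rw [pvStrip, dif_pos ⟨hm, ht', hd'⟩]
    refine ih ?_
    rw [PySem.Int.floordiv_eq_ediv_of_pos (by omega : (0:Int) < d)]
    exact (pv_div_lt t d ht' hd' hdvd).1
  | case2 t s h =>
    rw [pvStrip, dif_neg h]
    intro hdvd
    exact h ⟨(PySem.Int.mod_eq_zero_iff_dvd t d).mpr hdvd, ht, hd⟩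

-- if n has no divisor whose square fits, the scan returns n
theorem smallestFac_eq_self (d n : Int)
    (h : ∀ k, 2 ≤ k → k * k ≤ n → ¬ k ∣ n) : smallestFac d n = n := by
  induction d using smallestFac.induct n with
  | case1 d hc hm =>
    exact absurd ((PySem.Int.mod_eq_zero_iff_dvd n d).mp hm) (h d hc.2 hc.1)
  | case2 d hc hm ih => rw [smallestFac, dif_pos hc, if_neg hm]; exact ih
  | case3 d hc => rw [smallestFac, dif_neg hc]

-- the scan from d finds p when p is the least divisor ≥ d and p*p ≤ n
theorem smallestFac_finds (p n : Int) (hp : p ∣ n) (hpp : p * p ≤ n) :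
    ∀ (m : Nat) (d : Int), 2 ≤ d → d ≤ p → p - d ≤ (m : Int) →
      (∀ k, d ≤ k → k < p → ¬ k ∣ n) → smallestFac d n = p := by
  intro m
  induction m with
  | zero =>
    intro d hd2 hdp hm _
    have hdp' : d = p := by omega
    subst hdp'
    rw [smallestFac, dif_pos ⟨hpp, hd2⟩,
      if_pos ((PySem.Int.mod_eq_zero_iff_dvd n d).mpr hp)]
  | succ m ih =>
    intro d hd2 hdp hm hmin
    rcases eq_or_lt_of_le hdp with he | hlt
    · subst he
      rw [smallestFac, dif_pos ⟨hpp, hd2⟩,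
        if_pos ((PySem.Int.mod_eq_zero_iff_dvd n d).mpr hp)]
    · have hdd : d * d ≤ n := by nlinarith
      have hnd : ¬ d ∣ n := hmin d le_rfl hlt
      have hnm : ¬ PySem.Int.mod n d = 0 := fun h =>
        hnd ((PySem.Int.mod_eq_zero_iff_dvd n d).mp h)
      rw [smallestFac, dif_pos ⟨hdd, hd2⟩, if_neg hnm]
      exact ih (d + 1) (by omega) (by omega) (by omega)
        (fun k hk hkp => hmin k (by omega) hkp)

-- one unfolding of sumPF at the least divisor p of t
theorem sumPF_min (t p : Int) (hp2 : 2 ≤ p) (hpt : p ∣ t) (hle : p ≤ t)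
    (hmin : ∀ k, 2 ≤ k → k < p → ¬ k ∣ t) :
    sumPF t = p + sumPF (PySem.Int.floordiv t p) := by
  rcases eq_or_lt_of_le hle with he | hlt
  · subst he
    have hself : smallestFac 2 p = p := smallestFac_eq_self 2 p (by
      intro k hk2 hkk hkd
      have hkle : k ≤ p := Int.le_of_dvd (by omega) hkd
      rcases eq_or_lt_of_le hkle with he2 | hl2
      · subst he2; nlinarith
      · exact hmin k hk2 hl2 hkd)
    rw [sumPF, dif_pos (by omega : (2:Int) ≤ p), dif_pos hself]
    rw [PySem.Int.floordiv_eq_ediv_of_pos (by omega : (0:Int) < p),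
      Int.ediv_self (by omega : p ≠ 0)]
    rw [sumPF, dif_neg (by omega : ¬ (2:Int) ≤ 1)]
    ring
  · obtain ⟨q, hq⟩ := hpt
    have hq2 : 2 ≤ q := by nlinarith
    have hqd : q ∣ t := ⟨p, by linarith [hq]; ⟩
    have hqp : p ≤ q := by
      by_contra hqp
      exact hmin q hq2 (by omega) ⟨p, by rw [hq]; ring⟩
    have hpp : p * p ≤ t := by nlinarith
    have hfind : smallestFac 2 t = p :=
      smallestFac_finds p t ⟨q, hq⟩ hpp (p - 2).toNat 2 le_rfl hp2 (by omega)
        (fun k hk hkp => hmin k hk hkp)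
    have hne : smallestFac 2 t ≠ t := by rw [hfind]; omega
    rw [sumPF, dif_pos (by omega : (2:Int) ≤ t), dif_neg hne, hfind]

-- stripping the least divisor d commutes with sumPF
theorem strip_sumPF (d : Int) : ∀ (t s : Int), 0 < t → 2 ≤ d →
    (∀ k, 2 ≤ k → k < d → ¬ k ∣ t) →
    (pvStrip d t s).2 + sumPF ((pvStrip d t s).1) = s + sumPF t := by
  intro t s
  induction t, s using pvStrip.induct d with
  | case1 t s h ih =>
    intro ht hd hmin
    obtain ⟨hm, ht', hd'⟩ := h
    have hdvd : d ∣ t := (PySem.Int.mod_eq_zero_iff_dvd t d).mp hm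
    have hfd : PySem.Int.floordiv t d = t / d :=
      PySem.Int.floordiv_eq_ediv_of_pos (by omega : (0:Int) < d)
    have hdl := pv_div_lt t d ht' hd' hdvd
    have htdvd : t / d ∣ t := by
      obtain ⟨q, rfl⟩ := hdvd
      rw [Int.mul_ediv_cancel_left _ (by omega : d ≠ 0)]
      exact ⟨d, by ring⟩
    rw [pvStrip, dif_pos ⟨hm, ht', hd'⟩]
    rw [ih (by omega) hd (fun k hk2 hkd hkdvd => hmin k hk2 hkd (hkdvd.trans (hfd ▸ htdvd)))]
    have hsum : sumPF t = d + sumPF (PySem.Int.floordiv t d) :=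
      sumPF_min t d hd' hdvd (Int.le_of_dvd ht' hdvd) hmin
    rw [hsum]; ring
  | case2 t s h =>
    intro _ _ _
    rw [pvStrip, dif_neg h]

-- main lemma: A's divisor scan computes s + sumPF t
theorem loopA_sumPF (d t s : Int) : 0 < t → 2 ≤ d →
    (∀ k, 2 ≤ k → k < d → ¬ k ∣ t) → pvFinish (loopA d t s) = s + sumPF t := by
  induction d, t, s using loopA.induct with
  | case1 d t s h ih =>
    intro ht hd hmin
    obtain ⟨hdt, hd2⟩ := h
    have ht' : 0 < (pvStrip d t s).1 := pvStrip_fst_pos d t s ht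
    have hmin' : ∀ k, 2 ≤ k → k < d + 1 → ¬ k ∣ (pvStrip d t s).1 := by
      intro k hk2 hk hkd
      rcases lt_or_eq_of_le (by omega : k ≤ d) with hl | he
      · exact hmin k hk2 hl (hkd.trans (pvStrip_fst_dvd d t s))
      · subst he; exact pvStrip_not_dvd k t s ht hk2 hkd
    rw [loopA, dif_pos ⟨hdt, hd2⟩, ih ht' (by omega) hmin',
      strip_sumPF d t s ht hd2 hmin]
  | case2 d t s h =>
    intro ht hd hmin
    have hnd : ¬ d * d ≤ t := fun hc => h ⟨hc, hd⟩
    rw [loopA, dif_neg h]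
    unfold pvFinish
    by_cases h1 : 1 < t
    · rw [if_pos h1]
      have hself : smallestFac 2 t = t := smallestFac_eq_self 2 t (by
        intro k hk2 hkk hkd
        have hkd' : k < d := by nlinarith
        exact hmin k hk2 hkd' hkd)
      have : sumPF t = t := by rw [sumPF, dif_pos (by omega : (2:Int) ≤ t), dif_pos hself]
      omega
    · rw [if_neg h1]
      have : sumPF t = 0 := by rw [sumPF, dif_neg (by omega : ¬ (2:Int) ≤ t)]
      omega

theorem sumA_eq_sumPF (n : Int) : sumA n = sumPF n := by
  by_cases hn : 0 < n
  · exact loopA_sumPF 2 n 0 hn le_rfl (fun k hk2 hkd => by omega) |>.trans (by ring) |>.symm ▸ rfl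
  · unfold sumA pvFinish
    rw [loopA, dif_neg (by intro h; omega)]
    rw [if_neg (by simp; omega)]
    rw [sumPF, dif_neg (by omega)]

theorem runA_eq_runB (fuel : Nat) (n : Int) : runA fuel n = runB fuel n := by
  induction fuel generalizing n with
  | zero => rfl
  | succ f ih => simp only [runA, runB, sumA_eq_sumPF, ih]

-- ===== VERDICT (by name: the statement is the Claim_ definition above) =====
theorem smallestValue_spec : Claim_equal_smallestValue := by
  intro n _
  unfold Spec_smallestValue smallestValue smallestValue_alt
  exact runA_eq_runB (n.toNat + 2) n
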